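-- pv_equiv track=rewrite | github.com/matthieubarthollet/advent-of-code-2025 | day6/solution1.py | parse_worksheet
-- ===== SOURCE A (Python) =====
-- from typing import List, Tuple
--
-- def parse_worksheet(lines: List[str]) -> Tuple[List[int], int]:
--     """
--     Analyse une seule "worksheet" (une grille).
--
--     Chaque "problème" est un bloc de colonnes non vides, séparé par
--     au moins une colonne de spaces. La dernière ligne du bloc contient
--     l'opération (+ ou *), les lignes au-dessus contiennent les nombres.
--     """
--
--     # On enlève d'éventuelles lignes vides en bas du bloc
--     while lines and lines[-1].strip() == "":
--         lines.pop()
--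
--     if not lines:
--         return [], 0
--
--     # Normaliser les lignes (même longueur, padding avec des espaces)
--     width = max(len(line) for line in lines)
--     grid = [line.ljust(width) for line in lines]
--     rows, cols = len(grid), width
--
--     # Trouver les blocs de colonnes correspondant à chaque problème
--     blocks = []
--     in_block = False
--     start = None
--
--     for c in range(cols):
--         col_is_empty = all(grid[r][c] == " " for r in range(rows))
--         if col_is_empty:
--             if in_block:
--                 blocks.append((start, c - 1))
--                 in_block = False
--         else:
--             if not in_block:
--                 start = c
--                 in_block = True
--
--     if in_block:
--         blocks.append((start, cols - 1))
--
--     results: List[int] = []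
--     grand_total = 0
--
--     # La dernière ligne est celle des opérations
--     op_row = rows - 1
--
--     for c1, c2 in blocks:
--         # Opération sur la dernière ligne du bloc
--         op_segment = grid[op_row][c1 : c2 + 1].strip()
--         if not op_segment:
--             continue
--         op = op_segment[0]
--
--         # Lire les nombres (toutes les lignes sauf la dernière)
--         nums: List[int] = []
--         for r in range(rows - 1):
--             seg = grid[r][c1 : c2 + 1].strip()
--             if seg:  # si non vide, c'est un nombre
--                 # En cas de caractères bizarres, ça lèvera une ValueError
--                 nums.append(int(seg))
--
--         if not nums:
--             continue
--
--         if op == "+":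
--             value = sum(nums)
--         elif op == "*":
--             value = 1
--             for n in nums:
--                 value *= n
--         else:
--             raise ValueError(f"Opération inconnue : {op!r} (bloc colonnes {c1}-{c2})")
--
--         results.append(value)
--         grand_total += value
--
--     return results, grand_total
-- ===== SOURCE B (Python) =====
-- # B: same trailing-blank pop, then transpose the grid into column strings,
-- # split the column list on all-space columns, and rebuild each block's row
-- # segments by zipping its columns (no index state machine, no grid slicing).
-- def parse_worksheet(lines):
--     # phase 1: identical in-place pop of trailing blank lines
--     while lines and lines[-1].strip() == "":
--         lines.pop()
--     if not lines:
--         return [], 0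
--     width = max(len(line) for line in lines)
--     rows = len(lines)
--     # phase 2: transpose into columns, split on all-space columns
--     cols = ["".join(line.ljust(width)[c] for line in lines) for c in range(width)]
--     blocks = []
--     cur = []
--     for col in cols:
--         if all(ch == " " for ch in col):
--             if cur:
--                 blocks.append(cur)
--                 cur = []
--         else:
--             cur.append(col)
--     if cur:
--         blocks.append(cur)
--     # phase 3: parse each block from its own columns
--     results = []
--     grand_total = 0
--     for block in blocks:
--         row_segs = ["".join(chars) for chars in zip(*block)]
--         op_seg = row_segs[-1].strip()
--         if not op_seg:
--             continue
--         nums = [int(seg) for seg in (s.strip() for s in row_segs[:-1]) if seg]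
--         if not nums:
--             continue
--         op = op_seg[0]
--         if op == "+":
--             value = sum(nums)
--         elif op == "*":
--             value = 1
--             for n in nums:
--                 value *= n
--         else:
--             raise ValueError(f"Opération inconnue : {op!r}")
--         results.append(value)
--         grand_total += value
--     return results, grand_total
-- ===== Notes on version B (the rewrite author's own statement) =====
-- stated objective: alternative
-- what changed: Block detection is re-decomposed: instead of A's per-column in_block/start state machine producing (c1,c2) index spans that are later sliced out of each grid row, B transposes the padded grid into column strings, splits the column list on all-space columns, and rebuilds each block's row segments by zipping the block's own columns; the trailing-blank pop, int()/op parsing and raising behaviour are unchanged.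
import Mathlib
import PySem

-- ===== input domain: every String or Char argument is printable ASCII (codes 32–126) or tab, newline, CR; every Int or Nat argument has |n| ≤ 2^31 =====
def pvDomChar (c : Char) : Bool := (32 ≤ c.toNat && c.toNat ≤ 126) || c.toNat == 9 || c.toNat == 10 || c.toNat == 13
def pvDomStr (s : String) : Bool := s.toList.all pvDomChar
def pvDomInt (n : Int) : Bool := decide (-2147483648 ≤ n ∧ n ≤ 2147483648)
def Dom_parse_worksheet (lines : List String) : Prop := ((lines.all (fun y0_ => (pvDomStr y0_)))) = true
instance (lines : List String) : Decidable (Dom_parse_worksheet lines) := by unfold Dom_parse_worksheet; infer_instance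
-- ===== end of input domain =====

-- B replaces A's per-column in_block/start state machine and grid slicing by transposing the
-- grid into column strings, splitting the column list on all-space columns and zipping each
-- block's columns back into row segments (alternative decomposition, same cost).
-- A pops trailing blank lines from `lines` in place; B performs the same mutation; the
-- equivalence proved here is about the return value.

-- ===== PORT A =====
-- shared helper: the identical `while lines and lines[-1].strip() == "": lines.pop()` loop of both Pythons
-- the loop pops blank lines from the end: structurally, drop from the reversed list while blank
def popBlanksRev : List String → List String
  | [] => []
  | l :: rest => if PySem.Chars.strip l.toList = [] then popBlanksRev rest else l :: rest

def popBlanks (ls : List String) : List String := (popBlanksRev ls.reverse).reverse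

-- shared helper: width = max(len(line) for line in lines)  (lines nonempty; lengths are Nats, so folding from 0 is that max)
def pwWidth (ls : List String) : Nat := (ls.map (fun l => l.toList.length)).foldl Nat.max 0

-- shared helper: line.ljust(width) — exact hand port (pad on the right with spaces)
def pwLjust (cs : List Char) (w : Nat) : List Char := cs ++ List.replicate (w - cs.length) ' '

-- col_is_empty = all(grid[r][c] == " " for r in range(rows))
def pwColEmpty (grid : List (List Char)) (c : Nat) : Bool :=
  grid.all (fun row => PySem.List.pyGetD row (c : Int) ' ' == ' ')

-- one step of A's in_block/start state machine (state: blocks, in_block, start)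
def pwStepA (grid : List (List Char)) (st : List (Nat × Nat) × Bool × Nat) (c : Nat) :
    List (Nat × Nat) × Bool × Nat :=
  if pwColEmpty grid c then
    if st.2.1 then (st.1 ++ [(st.2.2, c - 1)], false, st.2.2) else st
  else
    if st.2.1 then st else (st.1, true, c)

-- grid[r][c1:c2+1].strip()
def pwSeg (grid : List (List Char)) (c1 c2 r : Nat) : List Char :=
  PySem.Chars.strip (PySem.List.slice (PySem.List.pyGetD grid (r : Int) [])
    (some (c1 : Int)) (some ((c2 : Int) + 1)))

-- A's body for one block (c1, c2); int(seg) is ofChars?, none = ValueError (excluded by Pre_);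
-- the final `else` is Python's `raise ValueError` for an unknown op, also excluded by Pre_
def pwBlockA (grid : List (List Char)) (rows : Nat) (acc : List Int × Int) (b : Nat × Nat) :
    List Int × Int :=
  let opSeg := pwSeg grid b.1 b.2 (rows - 1)
  if opSeg = [] then acc else
  let op := opSeg.headD ' '
  let nums := (List.range (rows - 1)).foldl (fun ns r =>
      let seg := pwSeg grid b.1 b.2 r
      if seg = [] then ns else ns ++ [(PySem.Int.ofChars? seg).getD 0]) []
  if nums = [] then acc
  else if op = '+' then (acc.1 ++ [nums.sum], acc.2 + nums.sum)
  else if op = '*' then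
    let v := nums.foldl (· * ·) 1
    (acc.1 ++ [v], acc.2 + v)
  else acc

def parse_worksheet (lines : List String) : List Int × Int :=
  let L := popBlanks lines
  if L = [] then ([], 0) else
  let width := pwWidth L
  let grid := L.map (fun l => pwLjust l.toList width)
  let rows := grid.length
  let st := (List.range width).foldl (pwStepA grid) ([], false, 0)
  let blocks := if st.2.1 then st.1 ++ [(st.2.2, width - 1)] else st.1
  blocks.foldl (pwBlockA grid rows) ([], 0)

-- ===== PORT B =====
-- cols = ["".join(line.ljust(width)[c] for line in lines) for c in range(width)]
def pwColsB (lines : List String) (width : Nat) : List (List Char) :=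
  (List.range width).map (fun (c : Nat) =>
    lines.map (fun l => PySem.List.pyGetD (pwLjust l.toList width) (c : Int) ' '))

-- one step of B's split-on-blank-column loop (state: blocks, cur)
def pwStepB (st : List (List (List Char)) × List (List Char)) (col : List Char) :
    List (List (List Char)) × List (List Char) :=
  if col.all (· == ' ') then
    if st.2 = [] then st else (st.1 ++ [st.2], [])
  else (st.1, st.2 ++ [col])

-- B's body for one block (a list of column strings);
-- zip(*block) is exact as the r-indexed map since every column has exactly `rows` characters
def pwBlockB (rows : Nat) (acc : List Int × Int) (block : List (List Char)) : List Int × Int :=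
  let rowSegs := (List.range rows).map (fun (r : Nat) =>
      block.map (fun col => PySem.List.pyGetD col (r : Int) ' '))
  let opSeg := PySem.Chars.strip (PySem.List.pyGetD rowSegs (-1) [])
  if opSeg = [] then acc else
  let nums := ((rowSegs.dropLast.map PySem.Chars.strip).filter (· ≠ [])).map
      (fun s => (PySem.Int.ofChars? s).getD 0)
  if nums = [] then acc else
  let op := opSeg.headD ' '
  if op = '+' then (acc.1 ++ [nums.sum], acc.2 + nums.sum)
  else if op = '*' then
    let v := nums.foldl (· * ·) 1
    (acc.1 ++ [v], acc.2 + v)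
  else acc

def parse_worksheet_alt (lines : List String) : List Int × Int :=
  let L := popBlanks lines
  if L = [] then ([], 0) else
  let width := pwWidth L
  let rows := L.length
  let st := (pwColsB L width).foldl pwStepB ([], [])
  let blocks := if st.2 = [] then st.1 else st.1 ++ [st.2]
  blocks.foldl (pwBlockB rows) ([], 0)

-- ===== PRECONDITION & SPEC =====
-- Pre_ excludes exactly the inputs on which Python A raises: a block whose op row is nonempty
-- but some number segment is not int()-parsable (ValueError from int), or whose numbers are
-- nonempty and whose op character is neither '+' nor '*' (explicit raise ValueError).
-- Blocks are characterised declaratively as maximal runs of non-all-space columns.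
def pwGrid (L : List String) : List (List Char) := L.map (fun l => pwLjust l.toList (pwWidth L))

def pwSafe (L : List String) : Bool :=
  L.isEmpty ||
  (List.range (pwWidth L)).all (fun c1 =>
    (List.range (pwWidth L)).all (fun c2 =>
      -- not a maximal run of non-all-space columns: nothing to check
      !(decide (c1 ≤ c2) && ((List.range' c1 (c2 + 1 - c1)).all (fun c => !pwColEmpty (pwGrid L) c)) &&
        (decide (c1 = 0) || pwColEmpty (pwGrid L) (c1 - 1)) &&
        (decide (c2 = pwWidth L - 1) || pwColEmpty (pwGrid L) (c2 + 1))) ||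
      -- empty op row: the block is skipped before any int() or op check
      (pwSeg (pwGrid L) c1 c2 (L.length - 1)).isEmpty ||
      -- every nonempty number segment parses, and if any exists the op is '+' or '*'
      (((List.range (L.length - 1)).all (fun r =>
          (pwSeg (pwGrid L) c1 c2 r).isEmpty || (PySem.Int.ofChars? (pwSeg (pwGrid L) c1 c2 r)).isSome)) &&
       (((List.range (L.length - 1)).all (fun r => (pwSeg (pwGrid L) c1 c2 r).isEmpty)) ||
        (pwSeg (pwGrid L) c1 c2 (L.length - 1)).headD ' ' == '+' ||
        (pwSeg (pwGrid L) c1 c2 (L.length - 1)).headD ' ' == '*'))))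

def Pre_parse_worksheet (lines : List String) : Prop :=
  pwSafe ((lines.reverse.dropWhile (fun l => (PySem.Chars.strip l.toList).isEmpty)).reverse) = true

instance (lines : List String) : Decidable (Pre_parse_worksheet lines) := by
  unfold Pre_parse_worksheet; infer_instance

def pvWitness_parse_worksheet : List String := ["1 2", "3 4", "+ *"]

def Spec_parse_worksheet (lines : List String) (out : List Int × Int) : Prop :=
  out = parse_worksheet_alt lines
instance (lines : List String) (out : List Int × Int) : Decidable (Spec_parse_worksheet lines out) := by
  unfold Spec_parse_worksheet; infer_instance

-- ===== CLAIM (what is proved, stated in full; the proofs are below) =====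
def Claim_equal_parse_worksheet : Prop := ∀ (lines : List String),
  Dom_parse_worksheet lines → Pre_parse_worksheet lines →
  Spec_parse_worksheet lines (parse_worksheet lines)

-- ===== LEMMAS AND PROOFS =====

-- proof-side view: column c of the padded grid
def pwColFn (grid : List (List Char)) (c : Nat) : List Char :=
  grid.map (fun row => row.getD c ' ')

-- the columns of a span (c1, c2)
def pwSpanCols (grid : List (List Char)) (q : Nat × Nat) : List (List Char) :=
  (List.range' q.1 (q.2 + 1 - q.1)).map (pwColFn grid)

-- the invariant tying A's (blocks, in_block, start) to B's (blocks, cur) at column p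
def pwInv (grid : List (List Char)) (width p : Nat)
    (stA : List (Nat × Nat) × Bool × Nat)
    (stB : List (List (List Char)) × List (List Char)) : Prop :=
  stB.1 = stA.1.map (pwSpanCols grid) ∧
  (∀ q ∈ stA.1, q.1 ≤ q.2 ∧ q.2 < width) ∧
  (stA.2.1 = true → stA.2.2 < p ∧ stB.2 = (List.range' stA.2.2 (p - stA.2.2)).map (pwColFn grid)) ∧
  (stA.2.1 = false → stB.2 = [])

theorem foldl_max_init_le (xs : List Nat) : ∀ init, init ≤ xs.foldl Nat.max init := by
  induction xs with
  | nil => intro init; simp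
  | cons y ys ih => intro init; exact le_trans (Nat.le_max_left init y) (ih _)

theorem le_foldl_nat_max (xs : List Nat) (x : Nat) (hx : x ∈ xs) :
    ∀ init, x ≤ xs.foldl Nat.max init := by
  induction xs with
  | nil => cases hx
  | cons y ys ih =>
    intro init
    rcases List.mem_cons.1 hx with h | h
    · subst h; exact le_trans (Nat.le_max_right init x) (foldl_max_init_le ys _)
    · exact ih h _

theorem pw_row_len (L : List String) (row : List Char) (hrow : row ∈ pwGrid L) :
    row.length = pwWidth L := by
  rcases List.mem_map.1 hrow with ⟨l, hl, rfl⟩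
  have hm : l.toList.length ∈ L.map (fun l => l.toList.length) :=
    List.mem_map_of_mem hl
  have h1 : l.toList.length ≤ pwWidth L := le_foldl_nat_max _ _ hm 0
  simp only [pwLjust, List.length_append, List.length_replicate]
  omega

-- the generic append-if fold is filter+map
theorem foldl_seg_eq {α : Type} (g : List Char → α) (h : Nat → List Char) :
    ∀ (l : List Nat) (init : List α),
      l.foldl (fun ns r => if h r = [] then ns else ns ++ [g (h r)]) init
        = init ++ ((l.map h).filter (· ≠ [])).map g := by
  intro l
  induction l with
  | nil => intro init; simp
  | cons r rs ih =>
    intro init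
    by_cases hr : h r = [] <;> simp [List.foldl_cons, hr, ih]

-- a range'-indexed map of getD is a slice
theorem rangeMap_eq_slice (row : List Char) (c1 n : Nat) (h : c1 + n ≤ row.length) :
    (List.range' c1 n).map (fun c => row.getD c ' ') = (row.drop c1).take n := by
  apply List.ext_getElem
  · simp only [List.length_map, List.length_range', List.length_take, List.length_drop]
    omega
  · intro i h1 h2
    simp only [List.length_map, List.length_range', List.length_take, List.length_drop] at h1 h2
    simp only [List.getElem_map, List.getElem_range', List.getElem_take, List.getElem_drop]
    rw [List.getD_eq_getElem _ _ (by omega)]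
    congr 1
    omega

theorem colsB_eq (L : List String) (width : Nat) :
    pwColsB L width
      = (List.range width).map (pwColFn (L.map (fun l => pwLjust l.toList width))) := by
  unfold pwColsB
  apply List.map_congr_left
  intro c _
  simp [pwColFn, List.map_map, Function.comp_def]

theorem colEmpty_eq (grid : List (List Char)) (c : Nat) :
    pwColEmpty grid c = (pwColFn grid c).all (· == ' ') := by
  simp [pwColEmpty, pwColFn, List.all_map, Function.comp_def]

theorem machine (grid : List (List Char)) (width : Nat) :
    ∀ (n c : Nat) (stA : List (Nat × Nat) × Bool × Nat)
      (stB : List (List (List Char)) × List (List Char)),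
      c + n ≤ width → pwInv grid width c stA stB →
      pwInv grid width (c + n)
        ((List.range' c n).foldl (pwStepA grid) stA)
        (((List.range' c n).map (pwColFn grid)).foldl pwStepB stB) := by
  intro n
  induction n with
  | zero => intro c stA stB _ hInv; simpa using hInv
  | succ n ih =>
    intro c stA stB hle hInv
    obtain ⟨bsA, inb, st⟩ := stA
    obtain ⟨bsB, cur⟩ := stB
    obtain ⟨hmap, hspan, hin, hout⟩ := hInv
    dsimp only at hmap hspan hin hout
    have hcw : c < width := by omega
    have hstep : pwInv grid width (c + 1)
        (pwStepA grid (bsA, inb, st) c) (pwStepB (bsB, cur) (pwColFn grid c)) := by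
      unfold pwStepA pwStepB
      rw [← colEmpty_eq]
      dsimp only
      by_cases he : pwColEmpty grid c = true
      · cases inb with
        | true =>
          obtain ⟨hs, hcur⟩ := hin rfl
          have hcne : ¬ cur = [] := by
            rw [hcur]
            simp only [List.map_eq_nil_iff, List.range'_eq_nil_iff]
            omega
          rw [if_pos he, if_pos he, if_pos rfl, if_neg hcne]
          refine ⟨?_, ?_, by simp, fun _ => rfl⟩
          · dsimp only
            rw [List.map_append, hmap]
            congr 2
            simp only [pwSpanCols]
            rw [hcur]
            congr 2
            omega
          · intro qq hq
            rcases List.mem_append.1 hq with h | h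
            · exact hspan qq h
            · simp only [List.mem_cons, List.not_mem_nil, or_false] at h
              subst h
              exact ⟨by omega, by omega⟩
        | false =>
          have hc0 : cur = [] := hout rfl
          rw [if_pos he, if_pos he, if_neg (by simp), if_pos hc0]
          exact ⟨hmap, hspan, by simp, fun _ => hc0⟩
      · cases inb with
        | true =>
          obtain ⟨hs, hcur⟩ := hin rfl
          rw [if_neg he, if_neg he, if_pos rfl]
          refine ⟨hmap, hspan, fun _ => ⟨by dsimp only; omega, ?_⟩, by simp⟩
          dsimp only
          have h1 : c + 1 - st = (c - st) + 1 := by omega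
          have h2 : st + 1 * (c - st) = c := by omega
          rw [h1, List.range'_concat, List.map_append, ← hcur, h2]
          simp
        | false =>
          have hc0 : cur = [] := hout rfl
          rw [if_neg he, if_neg he, if_neg (by simp)]
          refine ⟨hmap, hspan, fun _ => ⟨by dsimp only; omega, ?_⟩, by simp⟩
          dsimp only
          rw [hc0]
          simp [List.range'_one]
    have hrec := ih (c + 1) _ _ (by omega) hstep
    rw [List.range'_succ, List.map_cons, List.foldl_cons, List.foldl_cons]
    have hcc : c + (n + 1) = (c + 1) + n := by omega
    rw [hcc]
    exact hrec

-- row r of a block's zip is the corresponding slice of grid row r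
theorem rowEq (L : List String) (q : Nat × Nat) (hq1 : q.1 ≤ q.2) (hq2 : q.2 < pwWidth L)
    (r : Nat) (hr : r < L.length) :
    (pwSpanCols (pwGrid L) q).map (fun col => PySem.List.pyGetD col (r : Int) ' ')
      = PySem.List.slice (PySem.List.pyGetD (pwGrid L) (r : Int) [])
          (some (q.1 : Int)) (some ((q.2 : Int) + 1)) := by
  have hrg : r < (pwGrid L).length := by simp [pwGrid]; omega
  have hgr : PySem.List.pyGetD (pwGrid L) (r : Int) [] = (pwGrid L).getD r [] :=
    PySem.List.pyGetD_natCast _ _ _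
  have hmem : (pwGrid L).getD r [] ∈ pwGrid L := by
    rw [List.getD_eq_getElem _ _ hrg]
    exact List.getElem_mem hrg
  have hlen : ((pwGrid L).getD r []).length = pwWidth L := pw_row_len L _ hmem
  rw [hgr]
  have hb : ((q.2 : Int) + 1) = ((q.2 + 1 : Nat) : Int) := by push_cast; ring
  rw [hb, PySem.List.slice_natCast]
  simp only [pwSpanCols, List.map_map]
  have hcol : ∀ c : Nat, (pwColFn (pwGrid L) c).getD r ' '
      = ((pwGrid L).getD r []).getD c ' ' := by
    intro c
    simp only [pwColFn]
    rw [List.getD_eq_getElem _ _ (by simpa using hrg), List.getElem_map,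
      List.getD_eq_getElem _ _ hrg]
  calc (List.range' q.1 (q.2 + 1 - q.1)).map
        ((fun col => PySem.List.pyGetD col (r : Int) ' ') ∘ pwColFn (pwGrid L))
      = (List.range' q.1 (q.2 + 1 - q.1)).map (fun c => ((pwGrid L).getD r []).getD c ' ') := by
        apply List.map_congr_left
        intro c _
        simp only [Function.comp_apply, PySem.List.pyGetD_natCast]
        exact hcol c
    _ = (((pwGrid L).getD r []).drop q.1).take (q.2 + 1 - q.1) := by
        apply rangeMap_eq_slice
        rw [hlen]
        omega

-- per-block parse equality
theorem blockEq (L : List String) (hL : L ≠ []) (q : Nat × Nat)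
    (hq1 : q.1 ≤ q.2) (hq2 : q.2 < pwWidth L) (acc : List Int × Int) :
    pwBlockA (pwGrid L) L.length acc q
      = pwBlockB L.length acc (pwSpanCols (pwGrid L) q) := by
  have hrows : 0 < L.length := List.length_pos_of_ne_nil hL
  have hrowSegs : (List.range L.length).map (fun (r : Nat) =>
        (pwSpanCols (pwGrid L) q).map (fun col => PySem.List.pyGetD col (r : Int) ' '))
      = (List.range L.length).map (fun (r : Nat) =>
        PySem.List.slice (PySem.List.pyGetD (pwGrid L) (r : Int) [])
          (some (q.1 : Int)) (some ((q.2 : Int) + 1))) := by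
    apply List.map_congr_left
    intro r hr
    exact rowEq L q hq1 hq2 r (List.mem_range.1 hr)
  simp only [pwBlockA, pwBlockB, hrowSegs]
  -- the op segment
  have hlenRS : ((List.range L.length).map (fun (r : Nat) =>
      PySem.List.slice (PySem.List.pyGetD (pwGrid L) (r : Int) [])
        (some (q.1 : Int)) (some ((q.2 : Int) + 1)))).length = L.length := by simp
  have hne : ((List.range L.length).map (fun (r : Nat) =>
      PySem.List.slice (PySem.List.pyGetD (pwGrid L) (r : Int) [])
        (some (q.1 : Int)) (some ((q.2 : Int) + 1)))) ≠ [] := by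
    simp only [ne_eq, List.map_eq_nil_iff, List.range_eq_nil]
    omega
  rw [PySem.List.pyGetD_neg_one _ _ hne]
  have hlast : ((List.range L.length).map (fun (r : Nat) =>
      PySem.List.slice (PySem.List.pyGetD (pwGrid L) (r : Int) [])
        (some (q.1 : Int)) (some ((q.2 : Int) + 1)))).getLast hne
      = PySem.List.slice (PySem.List.pyGetD (pwGrid L) ((L.length - 1 : Nat) : Int) [])
          (some (q.1 : Int)) (some ((q.2 : Int) + 1)) := by
    rw [List.getLast_eq_getElem]
    simp only [List.getElem_map, hlenRS]
    congr 1
    rw [List.getElem_range]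
  rw [hlast]
  -- the number segments
  have hdrop : ((List.range L.length).map (fun (r : Nat) =>
      PySem.List.slice (PySem.List.pyGetD (pwGrid L) (r : Int) [])
        (some (q.1 : Int)) (some ((q.2 : Int) + 1)))).dropLast
      = (List.range (L.length - 1)).map (fun (r : Nat) =>
        PySem.List.slice (PySem.List.pyGetD (pwGrid L) (r : Int) [])
          (some (q.1 : Int)) (some ((q.2 : Int) + 1))) := by
    have hsplit : List.range L.length = List.range (L.length - 1) ++ [L.length - 1] := by
      conv_lhs => rw [show L.length = (L.length - 1) + 1 by omega]
      rw [List.range_succ]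
    rw [hsplit, List.map_append, List.map_cons, List.map_nil, List.dropLast_concat]
  rw [hdrop]
  have hnums : (List.range (L.length - 1)).foldl (fun ns r =>
        if pwSeg (pwGrid L) q.1 q.2 r = [] then ns
        else ns ++ [(PySem.Int.ofChars? (pwSeg (pwGrid L) q.1 q.2 r)).getD 0]) []
      = ((((List.range (L.length - 1)).map (fun (r : Nat) =>
          PySem.List.slice (PySem.List.pyGetD (pwGrid L) (r : Int) [])
            (some (q.1 : Int)) (some ((q.2 : Int) + 1)))).map PySem.Chars.strip).filter
            (· ≠ [])).map (fun s => (PySem.Int.ofChars? s).getD 0) := by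
    rw [foldl_seg_eq (fun s => (PySem.Int.ofChars? s).getD 0) (pwSeg (pwGrid L) q.1 q.2)]
    rw [List.map_map]
    simp only [List.nil_append]
    congr 2
  simp only [pwSeg] at hnums ⊢
  rw [hnums]
theorem ports_eq (lines : List String) : parse_worksheet lines = parse_worksheet_alt lines := by
  simp only [parse_worksheet, parse_worksheet_alt]
  by_cases hL : popBlanks lines = []
  · simp [hL]
  · simp only [if_neg hL]
    set L := popBlanks lines with hLdef
    have hgrid : L.map (fun l => pwLjust l.toList (pwWidth L)) = pwGrid L := rfl
    rw [colsB_eq, hgrid]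
    have hgl : (pwGrid L).length = L.length := by simp [pwGrid]
    rw [hgl]
    have hInv0 : pwInv (pwGrid L) (pwWidth L) 0 ([], false, 0) ([], []) :=
      ⟨rfl, by simp, by simp, fun _ => rfl⟩
    have hmach := machine (pwGrid L) (pwWidth L) (pwWidth L) 0 ([], false, 0) ([], [])
      (by omega) hInv0
    rw [← List.range_eq_range'] at hmach
    simp only [Nat.zero_add] at hmach
    set stA := (List.range (pwWidth L)).foldl (pwStepA (pwGrid L)) ([], false, 0) with hstA
    set stB := ((List.range (pwWidth L)).map (pwColFn (pwGrid L))).foldl pwStepB ([], []) with hstB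
    obtain ⟨hmap, hspan, hin, hout⟩ := hmach
    have hblocks : (if stB.2 = [] then stB.1 else stB.1 ++ [stB.2])
        = (if stA.2.1 then stA.1 ++ [(stA.2.2, pwWidth L - 1)] else stA.1).map
            (pwSpanCols (pwGrid L)) ∧
        (∀ q ∈ (if stA.2.1 then stA.1 ++ [(stA.2.2, pwWidth L - 1)] else stA.1),
          q.1 ≤ q.2 ∧ q.2 < pwWidth L) := by
      cases hb : stA.2.1 with
      | true =>
        obtain ⟨hs, hcur⟩ := hin hb
        have hcne : ¬ stB.2 = [] := by
          rw [hcur]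
          simp only [List.map_eq_nil_iff, List.range'_eq_nil_iff]
          omega
        rw [if_neg hcne, if_pos rfl]
        constructor
        · rw [List.map_append, hmap]
          congr 1
          simp only [pwSpanCols, List.map_cons, List.map_nil]
          rw [hcur]
          rw [show pwWidth L - 1 + 1 - stA.2.2 = pwWidth L - stA.2.2 by omega]
        · intro q hq
          rcases List.mem_append.1 hq with h | h
          · exact hspan q h
          · simp only [List.mem_cons, List.not_mem_nil, or_false] at h
            subst h
            exact ⟨by omega, by omega⟩
      | false =>
        rw [if_pos (hout hb), if_neg (by simp), hmap]
        exact ⟨rfl, hspan⟩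
    rw [hblocks.1, List.foldl_map]
    apply PySem.List.foldl_congr_mem
    intro acc q hq
    exact blockEq L hL q (hblocks.2 q hq).1 (hblocks.2 q hq).2 acc

-- ===== VERDICT (by name: the statement is the Claim_ definition above) =====
theorem parse_worksheet_spec : Claim_equal_parse_worksheet := by
  intro lines _ _
  unfold Spec_parse_worksheet
  exact ports_eq lines
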